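-- pv_equiv track=rewrite | github.com/JakubKazimierski/PythonPortfolio | Medium/StringScramble/StringScramble.py | StringScramble
-- ===== SOURCE A (Python) =====
-- import collections
--
-- def StringScramble(str1,str2):
--     '''
--     Have the function StringScramble(str1,str2)
--     take both parameters being passed and return
--     the string true if a portion of str1 characters
--     can be rearranged to match str2, otherwise return
--     the string false.
--
--     For example: if str1 is "rkqodlw" and str2 is "world"
--     the output should return true. Punctuation and symbols will
--     not be entered with the parameters.
--     '''
--
--     counter_I = collections.Counter(str1)
--     counter_II = collections.Counter(str2)
--
--     # below checks occurence of chars from shorter string in longer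
--     # or at least equal string
--     if len(str1) < len(str2):
--         for char in str1:
--             if counter_I[char] > counter_II[char]:
--                 return "false"
--     else:
--         for char in str2:
--             if counter_II[char] > counter_I[char]:
--                 return "false"
--
--
--     return "true"
-- ===== SOURCE B (Python) =====
-- def StringScramble(str1, str2):
--     small, large = (str1, str2) if len(str1) < len(str2) else (str2, str1)
--     s = sorted(small)
--     l = sorted(large)
--     j = 0
--     for c in s:
--         while j < len(l) and l[j] < c:
--             j += 1
--         if j == len(l) or l[j] != c:
--             return "false"
--         j += 1
--     return "true"
-- ===== Notes on version B (the rewrite author's own statement) =====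
-- stated objective: alternative
-- what changed: Replaces hash-based character counting (two Counters compared per character) by sorting both strings and running a single two-pointer merge sweep that matches each character of the shorter string against the sorted longer string.
import Mathlib
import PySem

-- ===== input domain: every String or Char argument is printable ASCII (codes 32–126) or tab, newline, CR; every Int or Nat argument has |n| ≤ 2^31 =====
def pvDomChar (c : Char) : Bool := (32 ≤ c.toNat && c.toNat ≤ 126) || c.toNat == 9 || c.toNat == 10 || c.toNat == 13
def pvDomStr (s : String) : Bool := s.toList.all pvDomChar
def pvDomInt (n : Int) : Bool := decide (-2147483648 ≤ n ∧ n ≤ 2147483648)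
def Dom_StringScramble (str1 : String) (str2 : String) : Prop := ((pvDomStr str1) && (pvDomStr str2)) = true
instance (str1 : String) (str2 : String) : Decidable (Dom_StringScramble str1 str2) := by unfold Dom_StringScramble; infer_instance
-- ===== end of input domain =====

-- B drops A's hash-based character counting entirely: it sorts both strings and
-- runs a two-pointer merge sweep of the shorter over the longer (alternative algorithm).

-- ===== PORT A =====
-- A's 'for char in small: if cS[char] > cL[char]: return "false"' loop, early return and all
def pvLoopA (cS cL : PySem.Dict Char Int) : List Char → String
  | [] => "true"
  | c :: rest => if cS.getD c 0 > cL.getD c 0 then "false" else pvLoopA cS cL rest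

def StringScramble (str1 : String) (str2 : String) : String :=
  let counterI := PySem.Dict.counter str1.toList
  let counterII := PySem.Dict.counter str2.toList
  if PySem.Str.len str1 < PySem.Str.len str2 then
    pvLoopA counterI counterII str1.toList
  else
    pvLoopA counterII counterI str2.toList

-- ===== PORT B =====
-- the two-pointer sweep: for each c of sorted small, the inner while skips
-- smaller chars of sorted large, then the head must equal c or we return "false"
def pvSweep : List Char → List Char → String
  | [], _ => "true"
  | _ :: _, [] => "false"
  | c :: cs, d :: ds =>
      if d < c then pvSweep (c :: cs) ds
      else if d = c then pvSweep cs ds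
      else "false"
  termination_by s l => s.length + l.length

def StringScramble_alt (str1 : String) (str2 : String) : String :=
  let (small, large) := if PySem.Str.len str1 < PySem.Str.len str2 then (str1, str2) else (str2, str1)
  pvSweep (PySem.List.sorted small.toList (fun c => c) false)
          (PySem.List.sorted large.toList (fun c => c) false)

-- ===== PRECONDITION & SPEC =====
def Spec_StringScramble (str1 : String) (str2 : String) (out : String) : Prop := out = StringScramble_alt str1 str2
instance (str1 : String) (str2 : String) (out : String) : Decidable (Spec_StringScramble str1 str2 out) := by unfold Spec_StringScramble; infer_instance

-- ===== CLAIM (what is proved, stated in full; the proofs are below) =====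
def Claim_equal_StringScramble : Prop := ∀ (str1 : String) (str2 : String), Dom_StringScramble str1 str2 → Spec_StringScramble str1 str2 (StringScramble str1 str2)

-- ===== LEMMAS AND PROOFS =====

theorem pvLoopA_eq_true_iff (cS cL : PySem.Dict Char Int) (l : List Char) :
    pvLoopA cS cL l = "true" ↔ ∀ c ∈ l, ¬ (cS.getD c 0 > cL.getD c 0) := by
  induction l with
  | nil => simp [pvLoopA]
  | cons c rest ih =>
    simp only [pvLoopA, List.mem_cons]
    split_ifs with h
    · constructor
      · intro hf; exact absurd hf (by decide)
      · intro hall; exact absurd h (hall c (Or.inl rfl))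
    · rw [ih]
      constructor
      · rintro hall x (rfl | hx)
        · exact h
        · exact hall x hx
      · intro hall x hx; exact hall x (Or.inr hx)

theorem pvLoopA_cases (cS cL : PySem.Dict Char Int) (l : List Char) :
    pvLoopA cS cL l = "true" ∨ pvLoopA cS cL l = "false" := by
  induction l with
  | nil => left; rfl
  | cons c rest ih =>
    simp only [pvLoopA]
    split_ifs
    · right; rfl
    · exact ih

theorem pvSweep_cases (s l : List Char) : pvSweep s l = "true" ∨ pvSweep s l = "false" := by
  fun_induction pvSweep with
  | case1 => left; rfl
  | case2 => right; rfl
  | case3 _ _ _ _ _ ih => exact ih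
  | case4 _ _ _ _ ih => exact ih
  | case5 => right; rfl

-- the merge sweep on two ascending lists answers exactly countwise containment
theorem pvSweep_true_iff (s l : List Char)
    (hs : s.Pairwise (· ≤ ·)) (hl : l.Pairwise (· ≤ ·)) :
    pvSweep s l = "true" ↔ ∀ x, s.count x ≤ l.count x := by
  fun_induction pvSweep with
  | case1 l =>
    simp only [List.count_nil]
    constructor
    · intro _ x; exact Nat.zero_le _
    · intro _; trivial
  | case2 c cs =>
    constructor
    · intro hf; exact absurd hf (by decide)
    · intro hall
      have := hall c
      rw [List.count_cons, if_pos (beq_self_eq_true c), List.count_nil] at this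
      exact absurd this (by omega)
  | case3 c cs d ds hdc ih =>
    rw [ih hs (List.Pairwise.sublist (List.sublist_cons_self d ds) hl)]
    have hnot : (c :: cs).count d = 0 := by
      rw [List.count_eq_zero]
      intro hmem
      rcases List.mem_cons.1 hmem with rfl | hmem
      · exact absurd hdc (lt_irrefl _)
      · have := (List.pairwise_cons.1 hs).1 d hmem
        exact absurd (lt_of_lt_of_le hdc this) (lt_irrefl _)
    constructor
    · intro h x
      have h2 : List.count x ds ≤ List.count x (d :: ds) := by
        rw [List.count_cons]; exact Nat.le_add_right _ _
      exact le_trans (h x) h2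
    · intro h x
      rcases eq_or_ne x d with rfl | hne
      · rw [hnot]; exact Nat.zero_le _
      · have hcc : List.count x (d :: ds) = List.count x ds := by
          rw [List.count_cons, if_neg (by simpa using Ne.symm hne), Nat.add_zero]
        have := h x
        rwa [hcc] at this
  | case4 cs d ds hdd ih =>
    rw [ih (List.Pairwise.sublist (List.sublist_cons_self d cs) hs)
          (List.Pairwise.sublist (List.sublist_cons_self d ds) hl)]
    constructor
    · intro h x
      rw [List.count_cons, List.count_cons]
      exact Nat.add_le_add_right (h x) _
    · intro h x
      have := h x
      rw [List.count_cons, List.count_cons] at this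
      exact Nat.le_of_add_le_add_right this
  | case5 c cs d ds hdc hde =>
    have hcd : c < d := lt_of_le_of_ne (not_lt.1 hdc) (Ne.symm hde)
    constructor
    · intro hf; exact absurd hf (by decide)
    · intro h
      have hzero : (d :: ds).count c = 0 := by
        rw [List.count_eq_zero]
        intro hmem
        rcases List.mem_cons.1 hmem with rfl | hmem
        · exact absurd hcd (lt_irrefl _)
        · have := (List.pairwise_cons.1 hl).1 c hmem
          exact absurd (lt_of_lt_of_le hcd this) (lt_irrefl _)
      have := h c
      rw [List.count_cons, if_pos (beq_self_eq_true c), hzero] at this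
      exact absurd this (by omega)

-- A's loop over `small` and B's sweep of sorted small over sorted large agree
theorem pvSides (s t : String) :
    pvLoopA (PySem.Dict.counter s.toList) (PySem.Dict.counter t.toList) s.toList =
      pvSweep (PySem.List.sorted s.toList (fun c => c) false)
              (PySem.List.sorted t.toList (fun c => c) false) := by
  have hperm_s := PySem.List.sorted_perm s.toList (fun c => c) false
  have hperm_t := PySem.List.sorted_perm t.toList (fun c => c) false
  have hiff :
      (pvSweep (PySem.List.sorted s.toList (fun c => c) false)
               (PySem.List.sorted t.toList (fun c => c) false) = "true")
        ↔ ∀ x, s.toList.count x ≤ t.toList.count x := by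
    rw [pvSweep_true_iff _ _
          (PySem.List.sorted_pairwise s.toList (fun c => c) )
          (PySem.List.sorted_pairwise t.toList (fun c => c) )]
    constructor
    · intro h x; have := h x; rwa [hperm_s.count_eq, hperm_t.count_eq] at this
    · intro h x; rw [hperm_s.count_eq, hperm_t.count_eq]; exact h x
  have hiffA :
      (pvLoopA (PySem.Dict.counter s.toList) (PySem.Dict.counter t.toList) s.toList = "true")
        ↔ ∀ x, s.toList.count x ≤ t.toList.count x := by
    rw [pvLoopA_eq_true_iff]
    constructor
    · intro h x
      by_cases hx : x ∈ s.toList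
      · have := h x hx
        simp only [PySem.Dict.getD_counter, gt_iff_lt, not_lt] at this
        exact_mod_cast this
      · rw [List.count_eq_zero_of_not_mem hx]; exact Nat.zero_le _
    · intro h x hx
      simp only [PySem.Dict.getD_counter, gt_iff_lt, not_lt]
      exact_mod_cast h x
  rcases pvSweep_cases (PySem.List.sorted s.toList (fun c => c) false)
      (PySem.List.sorted t.toList (fun c => c) false) with hb | hb
  · rw [hb, hiffA.2 (hiff.1 hb)]
  · rw [hb]
    rcases pvLoopA_cases (PySem.Dict.counter s.toList) (PySem.Dict.counter t.toList) s.toList with ha | ha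
    · rw [hiff.2 (hiffA.1 ha)] at hb
      exact absurd hb (by decide)
    · exact ha

-- ===== VERDICT (by name: the statement is the Claim_ definition above) =====
theorem StringScramble_spec : Claim_equal_StringScramble := by
  intro str1 str2 _
  unfold Spec_StringScramble StringScramble StringScramble_alt
  split_ifs with h
  · simpa using pvSides str1 str2
  · simpa using pvSides str2 str1
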